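-- pv_equiv track=rewrite | github.com/Mr-Ahmadi/AminoAcid-Repeats | animations/repeat detector.py | find_occurrences_masked
-- ===== SOURCE A (Python) =====
-- from typing import List, Tuple, Dict, Optional
--
-- def find_occurrences_masked(s: str, sub: str, mask: List[bool]) -> List[int]:
--     """
--     Exact matching: finds all non-overlapping occurrences of 'sub' in 's'
--     where the substring is not masked.
--     """
--     L = len(sub)
--     n = len(s)
--     occurrences = []
--     i = 0
--     while i <= n - L:
--         if s[i:i+L] == sub and not any(mask[i:i+L]):
--             occurrences.append(i)
--             i += L  # enforce non-overlap
--         else: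
--             i += 1
--     return occurrences
-- ===== SOURCE B (Python) =====
-- from typing import List
--
-- def find_occurrences_masked(s: str, sub: str, mask: List[bool]) -> List[int]:
--     L = len(sub)
--     m = len(mask)
--     # prefix sums of the mask: pref[k] = number of True in mask[:k]
--     pref = [0]
--     t = 0
--     for b in mask:
--         t += 1 if b else 0
--         pref.append(t)
--     # all (possibly overlapping) match positions, via C-level find
--     positions = []
--     j = s.find(sub)
--     while j != -1:
--         positions.append(j)
--         j = s.find(sub, j + 1)
--     # greedy non-overlap selection of unmasked matches
--     occ = []
--     last_end = 0
--     for p in positions: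
--         if last_end <= p and pref[min(p + L, m)] == pref[min(p, m)]:
--             occ.append(p)
--             last_end = p + L
--     return occ
-- ===== Notes on version B (the rewrite author's own statement) =====
-- stated objective: alternative
-- what changed: A scans every position slicing s[i:i+L] and any(mask[i:i+L]) inside one while loop; B enumerates all match positions with C-level str.find, precomputes prefix sums of the mask for O(1) window checks, then selects non-overlapping unmasked matches in one greedy pass.
-- outside the precondition, e.g. on find_occurrences_masked('aa', '', [False, False]): A does not finish within the time limit, B returns [0, 1, 2]
import Mathlib
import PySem

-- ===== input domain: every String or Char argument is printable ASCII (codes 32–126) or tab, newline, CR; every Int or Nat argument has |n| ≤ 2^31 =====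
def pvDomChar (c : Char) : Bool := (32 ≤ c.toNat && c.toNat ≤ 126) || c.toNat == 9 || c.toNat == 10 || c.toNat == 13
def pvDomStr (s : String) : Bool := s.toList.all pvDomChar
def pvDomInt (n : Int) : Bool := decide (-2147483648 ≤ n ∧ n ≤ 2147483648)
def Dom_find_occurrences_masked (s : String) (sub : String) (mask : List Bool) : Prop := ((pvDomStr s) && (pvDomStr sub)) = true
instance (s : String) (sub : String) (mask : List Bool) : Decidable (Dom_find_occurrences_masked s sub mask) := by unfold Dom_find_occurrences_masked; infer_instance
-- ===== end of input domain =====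

-- B replaces A's per-position slice-compare scan by find-based match enumeration,
-- mask prefix sums, and one greedy non-overlap pass (alternative algorithm; equal return values).

-- ===== PORT A =====
-- while i <= n - L: if s[i:i+L] == sub and not any(mask[i:i+L]): append i; i += L else i += 1
-- (fuel = n+1 only makes the loop total: Python A diverges when sub == '', excluded by Pre_)
def pvA_loop (sc bc : List Char) (mask : List Bool) (L n : Int) : Nat → Int → List Int
  | 0, _ => []
  | f + 1, i =>
    if i ≤ n - L then
      if (PySem.List.slice sc (some i) (some (i + L)) == bc)
          && !((PySem.List.slice mask (some i) (some (i + L))).any id) then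
        i :: pvA_loop sc bc mask L n f (i + L)
      else
        pvA_loop sc bc mask L n f (i + 1)
    else []

def find_occurrences_masked (s : String) (sub : String) (mask : List Bool) : List Int :=
  let sc := s.toList
  let bc := sub.toList
  pvA_loop sc bc mask bc.length sc.length (sc.length + 1) 0

-- ===== PORT B =====
-- pref = [0]; t = 0; for b in mask: t += 1 if b else 0; pref.append(t)
def pvPref (mask : List Bool) : List Int :=
  (mask.foldl
    (fun st b => (st.1 ++ [st.2 + (if b then 1 else 0)], st.2 + (if b then 1 else 0)))
    ([0], 0)).1

-- j = s.find(sub); while j != -1: positions.append(j); j = s.find(sub, j + 1)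
-- (fuel = n+1 only makes the loop total; it suffices for sub ≠ '')
def pvFindAll (sc bc : List Char) : Nat → Int → List Int
  | 0, _ => []
  | f + 1, start =>
    let j := PySem.Chars.findFrom sc bc start
    if j = -1 then [] else j :: pvFindAll sc bc f (j + 1)

-- for p in positions: if last_end <= p and pref[min(p+L,m)] == pref[min(p,m)]: append p; last_end = p + L
def pvGreedy (pref : List Int) (m L : Int) : List Int → Int → List Int
  | [], _ => []
  | p :: ps, lastEnd =>
    if lastEnd ≤ p ∧ pref.getD (min (p + L) m).toNat 0 = pref.getD (min p m).toNat 0 then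
      p :: pvGreedy pref m L ps (p + L)
    else
      pvGreedy pref m L ps lastEnd

def find_occurrences_masked_alt (s : String) (sub : String) (mask : List Bool) : List Int :=
  let sc := s.toList
  let bc := sub.toList
  pvGreedy (pvPref mask) mask.length bc.length (pvFindAll sc bc (sc.length + 1) 0) 0

-- ===== PRECONDITION & SPEC =====
-- Pre_ excludes only sub = "": there Python A loops forever (i += 0 after every match), so A never returns.
def Pre_find_occurrences_masked (s : String) (sub : String) (mask : List Bool) : Prop := sub ≠ ""
instance (s : String) (sub : String) (mask : List Bool) : Decidable (Pre_find_occurrences_masked s sub mask) := by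
  unfold Pre_find_occurrences_masked; infer_instance

def pvWitness_find_occurrences_masked : String × String × List Bool :=
  ("abcab", "ab", [false, true, false, false, false])

def Spec_find_occurrences_masked (s : String) (sub : String) (mask : List Bool) (out : List Int) : Prop :=
  out = find_occurrences_masked_alt s sub mask
instance (s : String) (sub : String) (mask : List Bool) (out : List Int) : Decidable (Spec_find_occurrences_masked s sub mask out) := by
  unfold Spec_find_occurrences_masked; infer_instance

-- ===== CLAIM (what is proved, stated in full; the proofs are below) =====
def Claim_equal_find_occurrences_masked : Prop :=
  ∀ (s : String) (sub : String) (mask : List Bool),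
    Dom_find_occurrences_masked s sub mask → Pre_find_occurrences_masked s sub mask →
      Spec_find_occurrences_masked s sub mask (find_occurrences_masked s sub mask)

-- ===== LEMMAS AND PROOFS =====

-- all textual match positions ≥ i, as a reference list (proof-only)
def pvMatches (sc bc : List Char) (i : Nat) : List Int :=
  ((List.range' i (sc.length + 1 - i)).filter (fun j => decide (bc <+: sc.drop j))).map
    (fun j => (j : Int))

-- a match of a nonempty pattern fits inside the string
lemma pv_match_fits {sc bc : List Char} {j : Nat} (hbc : bc ≠ []) (h : bc <+: sc.drop j) :
    j + bc.length ≤ sc.length := by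
  have h1 : bc.length ≤ (sc.drop j).length := h.length_le
  have h2 : (sc.drop j).length = sc.length - j := by simp
  have h3 : 1 ≤ bc.length := List.length_pos_iff.mpr hbc
  omega

lemma pvMatches_of_gt {sc bc : List Char} {i : Nat} (h : sc.length < i) :
    pvMatches sc bc i = [] := by
  unfold pvMatches
  have : sc.length + 1 - i = 0 := by omega
  simp [this]

lemma pvMatches_cons (sc bc : List Char) (i : Nat) (hi : i ≤ sc.length) :
    pvMatches sc bc i
      = (if bc <+: sc.drop i then [(i : Int)] else []) ++ pvMatches sc bc (i + 1) := by
  unfold pvMatches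
  have h1 : sc.length + 1 - i = (sc.length - i) + 1 := by omega
  have h2 : sc.length + 1 - (i + 1) = sc.length - i := by omega
  rw [h1, h2, List.range'_succ, List.filter_cons]
  by_cases h : bc <+: sc.drop i <;> simp [h]

lemma pvPref_foldl : ∀ (ms : List Bool) (pr : List Int) (t : Int),
    (ms.foldl
      (fun st b => (st.1 ++ [st.2 + (if b then 1 else 0)], st.2 + (if b then 1 else 0)))
      (pr, t)).1
    = pr ++ (List.range ms.length).map (fun k => t + ((ms.take (k + 1)).countP id : Int)) := by
  intro ms
  induction ms with
  | nil => intro pr t; simp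
  | cons b rest ih =>
    intro pr t
    simp only [List.foldl_cons]
    rw [ih]
    simp only [List.length_cons, List.range_succ_eq_map, List.map_cons, List.map_map,
      List.take_succ_cons, List.countP_cons, List.append_assoc, List.singleton_append]
    congr 2
    · by_cases hb : b <;> simp [hb]
    · apply List.map_congr_left
      intro k _
      simp only [Function.comp, id]
      push_cast
      by_cases hb : b <;> push_cast [hb] <;> ring

lemma pvPref_getD (mask : List Bool) (k : Nat) (hk : k ≤ mask.length) :
    (pvPref mask).getD k 0 = ((mask.take k).countP id : Int) := by
  unfold pvPref
  rw [pvPref_foldl]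
  cases k with
  | zero => simp
  | succ k' =>
    have hk' : k' < mask.length := by omega
    simp [List.getD_eq_getElem?_getD, hk']

lemma pv_take_min (mask : List Bool) (k : Nat) :
    mask.take (min k mask.length) = mask.take k := by
  rcases le_total k mask.length with h | h
  · rw [min_eq_left h]
  · rw [min_eq_right h, List.take_of_length_le h, List.take_of_length_le (le_refl _)]

lemma pvMask_bridge (mask : List Bool) (p L : Nat) :
    ((pvPref mask).getD (min (p + L) mask.length) 0 = (pvPref mask).getD (min p mask.length) 0)
      ↔ ((mask.drop p).take L).any id = false := by
  rw [pvPref_getD mask _ (min_le_right _ _), pvPref_getD mask _ (min_le_right _ _),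
    pv_take_min, pv_take_min, List.take_add, List.countP_append]
  rw [show (((mask.take p).countP id + ((mask.drop p).take L).countP id : Nat) : Int)
        = ((mask.take p).countP id : Int) + (((mask.drop p).take L).countP id : Int) by
      push_cast; ring]
  constructor
  · intro h
    have hc : ((mask.drop p).take L).countP id = 0 := by omega
    rw [List.any_eq_false]
    intro x hx
    simpa using List.countP_eq_zero.mp hc x hx
  · intro h
    have hc : ((mask.drop p).take L).countP id = 0 :=
      List.countP_eq_zero.mpr (fun a ha => by simpa using List.any_eq_false.mp h a ha)
    omega

lemma pvGreedy_skip (pref : List Int) (m L p e : Int) (ps : List Int) (h : p < e) :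
    pvGreedy pref m L (p :: ps) e = pvGreedy pref m L ps e := by
  rw [pvGreedy, if_neg]
  rintro ⟨h1, -⟩; omega

-- positions strictly below the gate are skipped without changing the gate
lemma pvGreedy_window (pref : List Int) (m L : Int) (sc bc : List Char) :
    ∀ (d k : Nat), k + d ≤ sc.length + 1 →
      pvGreedy pref m L (pvMatches sc bc k) ((k + d : Nat) : Int)
        = pvGreedy pref m L (pvMatches sc bc (k + d)) ((k + d : Nat) : Int) := by
  intro d
  induction d with
  | zero => intro k hk; rfl
  | succ d ih =>
    intro k hk
    have hk' : k ≤ sc.length := by omega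
    rw [pvMatches_cons sc bc k hk']
    have hrw : k + (d + 1) = (k + 1) + d := by omega
    by_cases h : bc <+: sc.drop k
    · rw [if_pos h]
      simp only [List.singleton_append]
      rw [pvGreedy_skip _ _ _ _ _ _ (by push_cast; omega)]
      rw [hrw]
      exact ih (k + 1) (by omega)
    · rw [if_neg h]
      simp only [List.nil_append]
      rw [hrw]
      exact ih (k + 1) (by omega)

lemma pvFindAll_eq (sc bc : List Char) (hbc : bc ≠ []) :
    ∀ (f i : Nat), i ≤ sc.length → sc.length + 1 ≤ f + i →
      pvFindAll sc bc f (i : Int) = pvMatches sc bc i := by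
  intro f
  induction f with
  | zero => intro i hi hf; exact (by omega : False).elim
  | succ f ih =>
    intro i hi hf
    have hL : 1 ≤ bc.length := List.length_pos_iff.mpr hbc
    rw [pvFindAll]
    by_cases h : PySem.Chars.findFrom sc bc (i : Int) = -1
    · rw [if_pos h]
      have hno : ¬ bc <:+: sc.drop i :=
        (PySem.Chars.findFrom_natCast_eq_neg_one_iff sc bc i hi).mp h
      symm
      unfold pvMatches
      rw [List.filter_eq_nil_iff.mpr ?_]
      · simp
      · intro t ht
        rw [List.mem_range'] at ht
        obtain ⟨o, ho, hto⟩ := ht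
        simp only [decide_eq_true_eq]
        intro hpre
        apply hno
        have h1 : bc <+: (sc.drop i).drop (t - i) := by
          rw [List.drop_drop, show i + (t - i) = t by omega]
          exact hpre
        exact (PySem.Chars.isIn_iff_infix bc (sc.drop i)).mp
          ((PySem.Chars.exists_prefix_drop_iff_isIn bc (sc.drop i)).mp ⟨t - i, h1⟩)
    · rw [if_neg h]
      obtain ⟨hge, hpre, hmin⟩ := PySem.Chars.findFrom_natCast_spec sc bc i hi h
      have hj0 : (0 : Int) ≤ PySem.Chars.findFrom sc bc (i : Int) :=
        le_trans (by positivity) hge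
      set jn := (PySem.Chars.findFrom sc bc (i : Int)).toNat with hjn
      have hjcast : PySem.Chars.findFrom sc bc (i : Int) = (jn : Int) :=
        (Int.toNat_of_nonneg hj0).symm
      have hfit : jn + bc.length ≤ sc.length := pv_match_fits hbc hpre
      have hle : i ≤ jn := by
        rw [hjcast] at hge; exact_mod_cast hge
      have h1 : pvFindAll sc bc f (PySem.Chars.findFrom sc bc (i : Int) + 1)
          = pvMatches sc bc (jn + 1) := by
        rw [hjcast, show ((jn : Int) + 1) = ((jn + 1 : Nat) : Int) by push_cast; ring]
        exact ih (jn + 1) (by omega) (by omega)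
      rw [h1, hjcast]
      symm
      rw [pvMatches, show List.range' i (sc.length + 1 - i)
            = List.range' i (jn - i) ++ List.range' (i + (jn - i)) (sc.length + 1 - jn) by
          rw [List.range'_append_1, show jn - i + (sc.length + 1 - jn) = sc.length + 1 - i by omega],
        show i + (jn - i) = jn by omega,
        show sc.length + 1 - jn = (sc.length - jn) + 1 by omega,
        List.range'_succ, List.filter_append, List.filter_cons]
      rw [List.filter_eq_nil_iff.mpr ?_]
      · rw [pvMatches, show sc.length + 1 - (jn + 1) = sc.length - jn by omega]
        simp [hpre]
      · intro t ht
        rw [List.mem_range'] at ht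
        obtain ⟨o, ho, hto⟩ := ht
        simp only [decide_eq_true_eq]
        exact hmin t (by omega) (by omega)

lemma pv_main (sc bc : List Char) (mask : List Bool) (hbc : bc ≠ []) :
    ∀ (f : Nat) (i : Nat) (e : Int), e ≤ (i : Int) → sc.length + 1 ≤ f + i →
      pvA_loop sc bc mask bc.length sc.length f (i : Int)
        = pvGreedy (pvPref mask) mask.length bc.length (pvMatches sc bc i) e := by
  have hL : 1 ≤ bc.length := List.length_pos_iff.mpr hbc
  intro f
  induction f with
  | zero =>
    intro i e he hf
    rw [pvA_loop, pvMatches_of_gt (by omega)]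
    rfl
  | succ f ih =>
    intro i e he hf
    rw [pvA_loop]
    by_cases hcond : (i : Int) ≤ (sc.length : Int) - (bc.length : Int)
    · rw [if_pos hcond]
      have hiL : i + bc.length ≤ sc.length := by omega
      have hi : i ≤ sc.length := by omega
      have hs1 : PySem.List.slice sc (some (i : Int)) (some ((i : Int) + (bc.length : Int)))
          = (sc.drop i).take bc.length := PySem.List.slice_natCast_add sc i bc.length
      have hs2 : PySem.List.slice mask (some (i : Int)) (some ((i : Int) + (bc.length : Int)))
          = (mask.drop i).take bc.length := PySem.List.slice_natCast_add mask i bc.length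
      rw [hs1, hs2, pvMatches_cons sc bc i hi]
      by_cases hmatch : bc <+: sc.drop i
      · have heq : (sc.drop i).take bc.length = bc := (List.prefix_iff_eq_take.mp hmatch).symm
        rw [if_pos hmatch]
        simp only [List.singleton_append]
        by_cases hmask : ((mask.drop i).take bc.length).any id = false
        · -- accepted: textual match, window unmasked
          have hcb : (((sc.drop i).take bc.length == bc)
              && !((mask.drop i).take bc.length).any id) = true := by
            simp [heq, hmask]
          rw [hcb]
          have hgate : e ≤ (i : Int) ∧
              (pvPref mask).getD (min ((i : Int) + (bc.length : Int)) (mask.length : Int)).toNat 0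
                = (pvPref mask).getD (min (i : Int) (mask.length : Int)).toNat 0 := by
            refine ⟨he, ?_⟩
            rw [show (i : Int) + (bc.length : Int) = ((i + bc.length : Nat) : Int) by push_cast; ring,
              ← Nat.cast_min, ← Nat.cast_min, Int.toNat_natCast, Int.toNat_natCast]
            exact (pvMask_bridge mask i bc.length).mpr hmask
          rw [pvGreedy, if_pos hgate]
          simp only [if_true]
          congr 1
          rw [show (i : Int) + (bc.length : Int) = ((i + bc.length : Nat) : Int) by push_cast; ring]
          have hw := pvGreedy_window (pvPref mask) mask.length bc.length sc bc
            (bc.length - 1) (i + 1) (by omega)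
          rw [show (i + 1) + (bc.length - 1) = i + bc.length by omega] at hw
          rw [hw]
          exact ih (i + bc.length) ((i + bc.length : Nat) : Int) le_rfl (by omega)
        · -- masked: A advances by 1, greedy skips without moving the gate
          have hmask' : ((mask.drop i).take bc.length).any id = true := by
            simpa using hmask
          have hcb : (((sc.drop i).take bc.length == bc)
              && !((mask.drop i).take bc.length).any id) = false := by
            simp [heq, hmask']
          rw [hcb]
          simp only [Bool.false_eq_true, if_false]
          rw [pvGreedy, if_neg ?_]
          · rw [show (i : Int) + 1 = ((i + 1 : Nat) : Int) by push_cast; ring]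
            exact ih (i + 1) e (by push_cast at he ⊢; omega) (by omega)
          · rintro ⟨-, hgd⟩
            rw [show (i : Int) + (bc.length : Int) = ((i + bc.length : Nat) : Int) by push_cast; ring,
              ← Nat.cast_min, ← Nat.cast_min, Int.toNat_natCast, Int.toNat_natCast] at hgd
            have := (pvMask_bridge mask i bc.length).mp hgd
            rw [hmask'] at this
            simp at this
      · -- no textual match: A advances by 1, the position is not in the match list
        have hneq : ((sc.drop i).take bc.length == bc) = false := by
          rw [beq_eq_false_iff_ne]
          intro hEq
          exact hmatch (List.prefix_iff_eq_take.mpr hEq.symm)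
        rw [if_neg hmatch, hneq]
        simp only [Bool.false_and, Bool.false_eq_true, if_false, List.nil_append]
        rw [show (i : Int) + 1 = ((i + 1 : Nat) : Int) by push_cast; ring]
        exact ih (i + 1) e (by push_cast at he ⊢; omega) (by omega)
    · rw [if_neg hcond]
      have hm : pvMatches sc bc i = [] := by
        unfold pvMatches
        rw [List.filter_eq_nil_iff.mpr ?_]
        · simp
        · intro t ht
          rw [List.mem_range'] at ht
          obtain ⟨o, ho, hto⟩ := ht
          simp only [decide_eq_true_eq]
          intro hp
          have := pv_match_fits hbc hp
          push_cast at hcond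
          omega
      rw [hm]
      rfl

-- ===== VERDICT (by name: the statement is the Claim_ definition above) =====
theorem find_occurrences_masked_spec : Claim_equal_find_occurrences_masked := by
  intro s sub mask _ hpre
  have hbc : sub.toList ≠ [] := fun h => hpre (String.toList_eq_nil_iff.mp h)
  have h1 := pv_main s.toList sub.toList mask hbc (s.toList.length + 1) 0 0 le_rfl (by omega)
  have h2 := pvFindAll_eq s.toList sub.toList hbc (s.toList.length + 1) 0 (by omega) (by omega)
  simp only [Nat.cast_zero, String.length_toList] at h1 h2
  simpa [Spec_find_occurrences_masked, find_occurrences_masked, find_occurrences_masked_alt, h2]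
    using h1
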